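-- pv_equiv track=rewrite | github.com/ilo-lang/ilo | research/explorations/bench-realistic/pattern-match.py | bench
-- ===== SOURCE A (Python) =====
-- def cata(x):
--     if x >= 800:
--         if x >= 900: return 9
--         return 8
--     if x >= 600:
--         if x >= 700: return 7
--         return 6
--     if x >= 400:
--         if x >= 500: return 5
--         return 4
--     if x >= 200:
--         if x >= 300: return 3
--         return 2
--     return 1
--
-- def catb(x):
--     if x >= 500: return x * 3
--     if x >= 200: return x * 2
--     return x
--
-- def combine(a, b):
--     if a >= 7: return b + a * 10
--     if a >= 4: return b + a * 5
--     return b + a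
--
-- def bench(n):
--     s = 0
--     for i in range(n):
--         a = cata(i)
--         b = catb(i)
--         c = combine(a, b)
--         s += c
--     return s
-- ===== SOURCE B (Python) =====
-- SEGS = [(0, 200, 1, 1), (200, 300, 2, 2), (300, 400, 2, 3), (400, 500, 2, 20),
--         (500, 600, 3, 25), (600, 700, 3, 30), (700, 800, 3, 70), (800, 900, 3, 80)]
--
-- def _seg(lo, hi, m, k, n):
--     # sum of m*i + k for i in [lo, min(n, hi))
--     u = min(n, hi)
--     if u <= lo:
--         return 0
--     cnt = u - lo
--     return m * ((lo + u - 1) * cnt // 2) + k * cnt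
--
-- def bench(n):
--     total = 0
--     for lo, hi, m, k in SEGS:
--         total += _seg(lo, hi, m, k, n)
--     if n > 900:
--         total += _seg(900, n, 3, 90, n)
--     return total
-- ===== Notes on version B (the rewrite author's own statement) =====
-- stated objective: faster
-- what changed: Replaces the O(n) loop over range(n) with a closed-form arithmetic-series sum over the nine constant breakpoint segments of the piecewise-linear summand.
import Mathlib
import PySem

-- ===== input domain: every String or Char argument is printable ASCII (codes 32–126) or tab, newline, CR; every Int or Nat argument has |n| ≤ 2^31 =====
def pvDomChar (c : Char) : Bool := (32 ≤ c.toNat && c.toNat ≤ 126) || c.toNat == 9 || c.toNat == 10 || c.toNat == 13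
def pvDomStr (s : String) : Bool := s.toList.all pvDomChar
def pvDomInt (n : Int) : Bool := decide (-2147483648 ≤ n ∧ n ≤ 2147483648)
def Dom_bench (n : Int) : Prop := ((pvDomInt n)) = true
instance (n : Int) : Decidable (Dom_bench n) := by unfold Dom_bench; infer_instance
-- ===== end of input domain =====

-- B replaces A's O(n) loop by an O(1) closed-form arithmetic-series sum per breakpoint segment.

-- ===== PORT A =====
def cata (x : Int) : Int :=
  if x ≥ 800 then (if x ≥ 900 then 9 else 8)
  else if x ≥ 600 then (if x ≥ 700 then 7 else 6)
  else if x ≥ 400 then (if x ≥ 500 then 5 else 4)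
  else if x ≥ 200 then (if x ≥ 300 then 3 else 2)
  else 1

def catb (x : Int) : Int :=
  if x ≥ 500 then x * 3 else if x ≥ 200 then x * 2 else x

def combine (a b : Int) : Int :=
  if a ≥ 7 then b + a * 10 else if a ≥ 4 then b + a * 5 else b + a

def bench (n : Int) : Int :=
  (PySem.List.pyRange 0 n 1).foldl (fun s i => s + combine (cata i) (catb i)) 0

-- ===== PORT B =====
-- segment [lo, min(n,hi)) contributes sum of m*i + k (port of _seg in Source B)
def segSum (lo hi m k n : Int) : Int :=
  let u := min n hi
  if lo < u then m * PySem.Int.floordiv ((lo + u - 1) * (u - lo)) 2 + k * (u - lo) else 0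

def benchSegs : List (Int × Int × Int × Int) :=
  [(0,200,1,1),(200,300,2,2),(300,400,2,3),(400,500,2,20),
   (500,600,3,25),(600,700,3,30),(700,800,3,70),(800,900,3,80)]

def bench_alt (n : Int) : Int :=
  let total := benchSegs.foldl (fun t s => t + segSum s.1 s.2.1 s.2.2.1 s.2.2.2 n) 0
  if n > 900 then total + segSum 900 n 3 90 n else total

-- ===== PRECONDITION & SPEC =====
def Spec_bench (n : Int) (out : Int) : Prop := out = bench_alt n
instance (n : Int) (out : Int) : Decidable (Spec_bench n out) := by unfold Spec_bench; infer_instance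

-- ===== CLAIM (what is proved, stated in full; the proofs are below) =====
def Claim_equal_bench : Prop := ∀ (n : Int), Dom_bench n → Spec_bench n (bench n)

-- ===== LEMMAS AND PROOFS =====
lemma fd2 (x : Int) : PySem.Int.floordiv (2 * x) 2 = x := by
  rw [PySem.Int.floordiv_eq_ediv_of_pos (by norm_num)]
  exact Int.mul_ediv_cancel_left x (by norm_num)

lemma tri_succ (a b : Int) :
    PySem.Int.floordiv ((a + b) * (b + 1 - a)) 2
      = PySem.Int.floordiv ((a + b - 1) * (b - a)) 2 + b := by
  rcases Int.even_or_odd (a + b) with ⟨c, hc⟩ | ⟨c, hc⟩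
  · have hb : b = c + c - a := by omega
    subst hb
    rw [show (a + (c + c - a)) * (c + c - a + 1 - a) = 2 * (c * (c + c - a + 1 - a)) from by ring]
    rw [show (a + (c + c - a) - 1) * (c + c - a - a) = 2 * ((a + c + c - a - 1) * (c - a)) from by ring]
    rw [fd2, fd2]; ring
  · have hb : b = 2 * c + 1 - a := by omega
    subst hb
    rw [show (a + (2 * c + 1 - a)) * (2 * c + 1 - a + 1 - a) = 2 * ((2 * c + 1) * (c + 1 - a)) from by ring]
    rw [show (a + (2 * c + 1 - a) - 1) * (2 * c + 1 - a - a) = 2 * (c * (2 * c + 1 - a - a)) from by ring]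
    rw [fd2, fd2]; ring

lemma segSum_zero (lo hi m k n : Int) (h : n ≤ lo) : segSum lo hi m k n = 0 := by
  simp only [segSum]
  split
  · exact absurd ‹_› (by omega)
  · rfl

lemma segSum_stable (lo hi m k n : Int) (h : hi ≤ n) :
    segSum lo hi m k (n + 1) = segSum lo hi m k n := by
  simp only [segSum]
  rw [min_eq_right (by omega : hi ≤ n + 1), min_eq_right h]

lemma segSum_eq (lo hi m k n : Int) (h1 : lo ≤ n) (h2 : n ≤ hi) :
    segSum lo hi m k n
      = m * PySem.Int.floordiv ((lo + n - 1) * (n - lo)) 2 + k * (n - lo) := by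
  simp only [segSum]
  rw [min_eq_left h2]
  split
  · rfl
  · have hx : (lo + n - 1) * (n - lo) = 2 * 0 := by
      have hn : n = lo := by omega
      rw [hn]; ring
    have hy : n - lo = 0 := by omega
    rw [hx, fd2, hy]; ring

lemma bench_alt_eq (n : Int) : bench_alt n =
    segSum 0 200 1 1 n + segSum 200 300 2 2 n + segSum 300 400 2 3 n +
    segSum 400 500 2 20 n + segSum 500 600 3 25 n + segSum 600 700 3 30 n +
    segSum 700 800 3 70 n + segSum 800 900 3 80 n +
    (if 900 < n then segSum 900 n 3 90 n else 0) := by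
  simp only [bench_alt, benchSegs, List.foldl]
  split <;> ring

lemma bench_step (n : Int) (hn : 0 ≤ n) :
    bench (n + 1) = bench n + combine (cata n) (catb n) := by
  simp only [bench]
  rw [PySem.List.pyRange_one_succ_right hn, List.foldl_append]
  simp [List.foldl]

set_option maxHeartbeats 1000000 in
lemma alt_step (n : Int) (hn : 0 ≤ n) :
    bench_alt (n + 1) = bench_alt n + combine (cata n) (catb n) := by
  rw [bench_alt_eq, bench_alt_eq]
  rcases (by omega : n < 200 ∨ (200 ≤ n ∧ n < 300) ∨ (300 ≤ n ∧ n < 400) ∨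
      (400 ≤ n ∧ n < 500) ∨ (500 ≤ n ∧ n < 600) ∨ (600 ≤ n ∧ n < 700) ∨
      (700 ≤ n ∧ n < 800) ∨ (800 ≤ n ∧ n < 900) ∨ 900 ≤ n)
    with h | h | h | h | h | h | h | h | h
  · rw [segSum_eq 0 200 1 1 (n+1) (by omega) (by omega), segSum_eq 0 200 1 1 n (by omega) (by omega)]
    rw [segSum_zero 200 300 2 2 (n+1) (by omega), segSum_zero 200 300 2 2 n (by omega)]
    rw [segSum_zero 300 400 2 3 (n+1) (by omega), segSum_zero 300 400 2 3 n (by omega)]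
    rw [segSum_zero 400 500 2 20 (n+1) (by omega), segSum_zero 400 500 2 20 n (by omega)]
    rw [segSum_zero 500 600 3 25 (n+1) (by omega), segSum_zero 500 600 3 25 n (by omega)]
    rw [segSum_zero 600 700 3 30 (n+1) (by omega), segSum_zero 600 700 3 30 n (by omega)]
    rw [segSum_zero 700 800 3 70 (n+1) (by omega), segSum_zero 700 800 3 70 n (by omega)]
    rw [segSum_zero 800 900 3 80 (n+1) (by omega), segSum_zero 800 900 3 80 n (by omega)]
    rw [if_neg (by omega), if_neg (by omega)]
    have ha : cata n = 1 := by
      unfold cata; split_ifs <;> omega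
    have hb : catb n = n := by
      unfold catb; split_ifs <;> omega
    have hcomb : combine (cata n) (catb n) = 1 * n + 1 := by
      rw [ha, hb]; unfold combine; split_ifs <;> omega
    rw [hcomb, show (0 + (n+1) - 1) * (n + 1 - 0) = (0 + n) * (n + 1 - 0) from by ring,
        tri_succ 0 n]
    ring
  · rw [segSum_stable 0 200 1 1 n (by omega)]
    rw [segSum_eq 200 300 2 2 (n+1) (by omega) (by omega), segSum_eq 200 300 2 2 n (by omega) (by omega)]
    rw [segSum_zero 300 400 2 3 (n+1) (by omega), segSum_zero 300 400 2 3 n (by omega)]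
    rw [segSum_zero 400 500 2 20 (n+1) (by omega), segSum_zero 400 500 2 20 n (by omega)]
    rw [segSum_zero 500 600 3 25 (n+1) (by omega), segSum_zero 500 600 3 25 n (by omega)]
    rw [segSum_zero 600 700 3 30 (n+1) (by omega), segSum_zero 600 700 3 30 n (by omega)]
    rw [segSum_zero 700 800 3 70 (n+1) (by omega), segSum_zero 700 800 3 70 n (by omega)]
    rw [segSum_zero 800 900 3 80 (n+1) (by omega), segSum_zero 800 900 3 80 n (by omega)]
    rw [if_neg (by omega), if_neg (by omega)]
    have ha : cata n = 2 := by
      unfold cata; split_ifs <;> omega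
    have hb : catb n = n * 2 := by
      unfold catb; split_ifs <;> omega
    have hcomb : combine (cata n) (catb n) = 2 * n + 2 := by
      rw [ha, hb]; unfold combine; split_ifs <;> omega
    rw [hcomb, show (200 + (n+1) - 1) * (n + 1 - 200) = (200 + n) * (n + 1 - 200) from by ring,
        tri_succ 200 n]
    ring
  · rw [segSum_stable 0 200 1 1 n (by omega), segSum_stable 200 300 2 2 n (by omega)]
    rw [segSum_eq 300 400 2 3 (n+1) (by omega) (by omega), segSum_eq 300 400 2 3 n (by omega) (by omega)]
    rw [segSum_zero 400 500 2 20 (n+1) (by omega), segSum_zero 400 500 2 20 n (by omega)]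
    rw [segSum_zero 500 600 3 25 (n+1) (by omega), segSum_zero 500 600 3 25 n (by omega)]
    rw [segSum_zero 600 700 3 30 (n+1) (by omega), segSum_zero 600 700 3 30 n (by omega)]
    rw [segSum_zero 700 800 3 70 (n+1) (by omega), segSum_zero 700 800 3 70 n (by omega)]
    rw [segSum_zero 800 900 3 80 (n+1) (by omega), segSum_zero 800 900 3 80 n (by omega)]
    rw [if_neg (by omega), if_neg (by omega)]
    have ha : cata n = 3 := by
      unfold cata; split_ifs <;> omega
    have hb : catb n = n * 2 := by
      unfold catb; split_ifs <;> omega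
    have hcomb : combine (cata n) (catb n) = 2 * n + 3 := by
      rw [ha, hb]; unfold combine; split_ifs <;> omega
    rw [hcomb, show (300 + (n+1) - 1) * (n + 1 - 300) = (300 + n) * (n + 1 - 300) from by ring,
        tri_succ 300 n]
    ring
  · rw [segSum_stable 0 200 1 1 n (by omega), segSum_stable 200 300 2 2 n (by omega),
        segSum_stable 300 400 2 3 n (by omega)]
    rw [segSum_eq 400 500 2 20 (n+1) (by omega) (by omega), segSum_eq 400 500 2 20 n (by omega) (by omega)]
    rw [segSum_zero 500 600 3 25 (n+1) (by omega), segSum_zero 500 600 3 25 n (by omega)]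
    rw [segSum_zero 600 700 3 30 (n+1) (by omega), segSum_zero 600 700 3 30 n (by omega)]
    rw [segSum_zero 700 800 3 70 (n+1) (by omega), segSum_zero 700 800 3 70 n (by omega)]
    rw [segSum_zero 800 900 3 80 (n+1) (by omega), segSum_zero 800 900 3 80 n (by omega)]
    rw [if_neg (by omega), if_neg (by omega)]
    have ha : cata n = 4 := by
      unfold cata; split_ifs <;> omega
    have hb : catb n = n * 2 := by
      unfold catb; split_ifs <;> omega
    have hcomb : combine (cata n) (catb n) = 2 * n + 20 := by
      rw [ha, hb]; unfold combine; split_ifs <;> omega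
    rw [hcomb, show (400 + (n+1) - 1) * (n + 1 - 400) = (400 + n) * (n + 1 - 400) from by ring,
        tri_succ 400 n]
    ring
  · rw [segSum_stable 0 200 1 1 n (by omega), segSum_stable 200 300 2 2 n (by omega),
        segSum_stable 300 400 2 3 n (by omega), segSum_stable 400 500 2 20 n (by omega)]
    rw [segSum_eq 500 600 3 25 (n+1) (by omega) (by omega), segSum_eq 500 600 3 25 n (by omega) (by omega)]
    rw [segSum_zero 600 700 3 30 (n+1) (by omega), segSum_zero 600 700 3 30 n (by omega)]
    rw [segSum_zero 700 800 3 70 (n+1) (by omega), segSum_zero 700 800 3 70 n (by omega)]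
    rw [segSum_zero 800 900 3 80 (n+1) (by omega), segSum_zero 800 900 3 80 n (by omega)]
    rw [if_neg (by omega), if_neg (by omega)]
    have ha : cata n = 5 := by
      unfold cata; split_ifs <;> omega
    have hb : catb n = n * 3 := by
      unfold catb; split_ifs <;> omega
    have hcomb : combine (cata n) (catb n) = 3 * n + 25 := by
      rw [ha, hb]; unfold combine; split_ifs <;> omega
    rw [hcomb, show (500 + (n+1) - 1) * (n + 1 - 500) = (500 + n) * (n + 1 - 500) from by ring,
        tri_succ 500 n]
    ring
  · rw [segSum_stable 0 200 1 1 n (by omega), segSum_stable 200 300 2 2 n (by omega),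
        segSum_stable 300 400 2 3 n (by omega), segSum_stable 400 500 2 20 n (by omega),
        segSum_stable 500 600 3 25 n (by omega)]
    rw [segSum_eq 600 700 3 30 (n+1) (by omega) (by omega), segSum_eq 600 700 3 30 n (by omega) (by omega)]
    rw [segSum_zero 700 800 3 70 (n+1) (by omega), segSum_zero 700 800 3 70 n (by omega)]
    rw [segSum_zero 800 900 3 80 (n+1) (by omega), segSum_zero 800 900 3 80 n (by omega)]
    rw [if_neg (by omega), if_neg (by omega)]
    have ha : cata n = 6 := by
      unfold cata; split_ifs <;> omega
    have hb : catb n = n * 3 := by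
      unfold catb; split_ifs <;> omega
    have hcomb : combine (cata n) (catb n) = 3 * n + 30 := by
      rw [ha, hb]; unfold combine; split_ifs <;> omega
    rw [hcomb, show (600 + (n+1) - 1) * (n + 1 - 600) = (600 + n) * (n + 1 - 600) from by ring,
        tri_succ 600 n]
    ring
  · rw [segSum_stable 0 200 1 1 n (by omega), segSum_stable 200 300 2 2 n (by omega),
        segSum_stable 300 400 2 3 n (by omega), segSum_stable 400 500 2 20 n (by omega),
        segSum_stable 500 600 3 25 n (by omega), segSum_stable 600 700 3 30 n (by omega)]
    rw [segSum_eq 700 800 3 70 (n+1) (by omega) (by omega), segSum_eq 700 800 3 70 n (by omega) (by omega)]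
    rw [segSum_zero 800 900 3 80 (n+1) (by omega), segSum_zero 800 900 3 80 n (by omega)]
    rw [if_neg (by omega), if_neg (by omega)]
    have ha : cata n = 7 := by
      unfold cata; split_ifs <;> omega
    have hb : catb n = n * 3 := by
      unfold catb; split_ifs <;> omega
    have hcomb : combine (cata n) (catb n) = 3 * n + 70 := by
      rw [ha, hb]; unfold combine; split_ifs <;> omega
    rw [hcomb, show (700 + (n+1) - 1) * (n + 1 - 700) = (700 + n) * (n + 1 - 700) from by ring,
        tri_succ 700 n]
    ring
  · rw [segSum_stable 0 200 1 1 n (by omega), segSum_stable 200 300 2 2 n (by omega),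
        segSum_stable 300 400 2 3 n (by omega), segSum_stable 400 500 2 20 n (by omega),
        segSum_stable 500 600 3 25 n (by omega), segSum_stable 600 700 3 30 n (by omega),
        segSum_stable 700 800 3 70 n (by omega)]
    rw [segSum_eq 800 900 3 80 (n+1) (by omega) (by omega), segSum_eq 800 900 3 80 n (by omega) (by omega)]
    rw [if_neg (by omega), if_neg (by omega)]
    have ha : cata n = 8 := by
      unfold cata; split_ifs <;> omega
    have hb : catb n = n * 3 := by
      unfold catb; split_ifs <;> omega
    have hcomb : combine (cata n) (catb n) = 3 * n + 80 := by
      rw [ha, hb]; unfold combine; split_ifs <;> omega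
    rw [hcomb, show (800 + (n+1) - 1) * (n + 1 - 800) = (800 + n) * (n + 1 - 800) from by ring,
        tri_succ 800 n]
    ring
  · rw [segSum_stable 0 200 1 1 n (by omega), segSum_stable 200 300 2 2 n (by omega),
        segSum_stable 300 400 2 3 n (by omega), segSum_stable 400 500 2 20 n (by omega),
        segSum_stable 500 600 3 25 n (by omega), segSum_stable 600 700 3 30 n (by omega),
        segSum_stable 700 800 3 70 n (by omega), segSum_stable 800 900 3 80 n (by omega)]
    have ha : cata n = 9 := by
      unfold cata; split_ifs <;> omega
    have hb : catb n = n * 3 := by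
      unfold catb; split_ifs <;> omega
    have hcomb : combine (cata n) (catb n) = 3 * n + 90 := by
      rw [ha, hb]; unfold combine; split_ifs <;> omega
    rcases eq_or_lt_of_le h with he | hgt
    · rw [← he]; decide
    · rw [if_pos (by omega), if_pos hgt]
      rw [segSum_eq 900 (n+1) 3 90 (n+1) (by omega) (by omega), segSum_eq 900 n 3 90 n (by omega) (by omega)]
      rw [hcomb, show (900 + (n+1) - 1) * (n + 1 - 900) = (900 + n) * (n + 1 - 900) from by ring,
          tri_succ 900 n]
      ring

lemma bench_eq_alt_of_nonneg (n : Int) (hn : 0 ≤ n) : bench n = bench_alt n := by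
  induction n, hn using Int.le_induction with
  | base => decide
  | succ n hn ih => rw [bench_step n hn, alt_step n hn, ih]

-- ===== VERDICT (by name: the statement is the Claim_ definition above) =====
theorem bench_spec : Claim_equal_bench := by
  intro n _
  unfold Spec_bench
  by_cases hn : 0 ≤ n
  · exact bench_eq_alt_of_nonneg n hn
  · rw [show bench n = 0 from by
        simp [bench, PySem.List.pyRange_one_eq_nil (by omega : n ≤ 0)],
      bench_alt_eq,
      segSum_zero 0 200 1 1 n (by omega), segSum_zero 200 300 2 2 n (by omega),
      segSum_zero 300 400 2 3 n (by omega), segSum_zero 400 500 2 20 n (by omega),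
      segSum_zero 500 600 3 25 n (by omega), segSum_zero 600 700 3 30 n (by omega),
      segSum_zero 700 800 3 70 n (by omega), segSum_zero 800 900 3 80 n (by omega),
      if_neg (by omega : ¬ 900 < n)]
    ring
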